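-- pv_equiv track=rewrite | github.com/Secuter/ColorConversion | tools/pdf-import/src/remap_sources.py | drop_skipped_columns
-- ===== SOURCE A (Python) =====
-- SKIP_HEADER = "__SKIP_COLUMN__"
--
-- def drop_skipped_columns(rows: list[list[str]]) -> list[list[str]]:
--     if not rows:
--         return rows
--
--     header = rows[0]
--     keep_indices = [idx for idx, name in enumerate(header) if name != SKIP_HEADER]
--     if len(keep_indices) == len(header):
--         return rows
--
--     filtered: list[list[str]] = []
--     for row in rows:
--         filtered.append([row[idx] if idx < len(row) else "" for idx in keep_indices])
--     return filtered
-- ===== SOURCE B (Python) =====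
-- SKIP_HEADER = "__SKIP_COLUMN__"
--
-- def drop_skipped_columns(rows: list[list[str]]) -> list[list[str]]:
--     if not rows:
--         return rows
--     header = rows[0]
--     if SKIP_HEADER not in header:
--         return rows
--     # build the table column-major: one padded column per kept header index
--     cols = [[row[i] if i < len(row) else "" for row in rows]
--             for i, name in enumerate(header) if name != SKIP_HEADER]
--     if not cols:
--         return [[] for _ in rows]
--     return [list(t) for t in zip(*cols)]
-- ===== Notes on version B (the rewrite author's own statement) =====
-- stated objective: alternative
-- what changed: B builds the table column-major (one padded column per kept header index, membership test instead of counting kept indices) and transposes the kept columns back into rows with zip, instead of A's row-major rebuild over keep_indices.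
import Mathlib
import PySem

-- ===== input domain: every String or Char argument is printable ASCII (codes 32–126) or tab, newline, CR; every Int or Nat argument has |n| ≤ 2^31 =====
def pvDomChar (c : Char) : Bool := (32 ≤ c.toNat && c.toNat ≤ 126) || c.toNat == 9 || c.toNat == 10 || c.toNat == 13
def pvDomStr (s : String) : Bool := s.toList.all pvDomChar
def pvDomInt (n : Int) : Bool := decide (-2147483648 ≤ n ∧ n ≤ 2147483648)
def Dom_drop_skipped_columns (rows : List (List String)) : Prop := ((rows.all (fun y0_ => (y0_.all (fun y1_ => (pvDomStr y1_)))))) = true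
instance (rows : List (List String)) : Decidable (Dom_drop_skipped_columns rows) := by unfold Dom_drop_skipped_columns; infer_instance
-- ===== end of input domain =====

-- B rebuilds the table column-major (padded kept columns, then a zip-style transpose) instead of A's row-major rebuild; same cost, alternative decomposition.

-- ===== PORT A =====
def SKIP_HEADER : String := "__SKIP_COLUMN__"

-- row[idx] with 0 ≤ idx guarded by idx < len(row): pyGetD is exact there
def drop_skipped_columns (rows : List (List String)) : List (List String) :=
  match rows with
  | [] => rows
  | header :: _ =>
    let keep := ((PySem.List.enumerate header 0).filter (fun p => p.2 != SKIP_HEADER)).map (fun p => p.1)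
    if keep.length = header.length then rows
    else rows.map (fun row => keep.map (fun idx =>
      if idx < (row.length : Int) then PySem.List.pyGetD row idx "" else ""))

-- ===== PORT B =====
-- zip(*cols) for a nonempty list of columns c :: cs (stops at the shortest list)
def pyZipStar (c : List String) (cs : List (List String)) : List (List String) :=
  match c with
  | [] => []
  | x :: c' =>
    if cs.all (fun l => !l.isEmpty) then
      (x :: cs.map (fun l => l.headD "")) :: pyZipStar c' (cs.map List.tail)
    else []

def drop_skipped_columns_alt (rows : List (List String)) : List (List String) :=
  match rows with
  | [] => rows
  | header :: _ =>
    if !(header.contains SKIP_HEADER) then rows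
    else
      let cols := (PySem.List.enumerate header 0).filterMap (fun p =>
        if p.2 != SKIP_HEADER then
          some (rows.map (fun row =>
            if p.1 < (row.length : Int) then PySem.List.pyGetD row p.1 "" else ""))
        else none)
      match cols with
      | [] => rows.map (fun _ => [])
      | c :: cs => pyZipStar c cs

-- ===== PRECONDITION & SPEC =====
def Spec_drop_skipped_columns (rows : List (List String)) (out : List (List String)) : Prop := out = drop_skipped_columns_alt rows
instance (rows : List (List String)) (out : List (List String)) : Decidable (Spec_drop_skipped_columns rows out) := by unfold Spec_drop_skipped_columns; infer_instance

-- ===== CLAIM (what is proved, stated in full; the proofs are below) =====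
def Claim_equal_drop_skipped_columns : Prop := ∀ (rows : List (List String)), Dom_drop_skipped_columns rows → Spec_drop_skipped_columns rows (drop_skipped_columns rows)

-- ===== LEMMAS AND PROOFS =====

-- ===== LEMMAS AND PROOFS =====

theorem keepLen (l : List String) : ∀ s : Int,
    ((((PySem.List.enumerate l s).filter (fun p => p.2 != SKIP_HEADER))).length = l.length)
      ↔ SKIP_HEADER ∉ l := by
  induction l with
  | nil => intro s; simp [PySem.List.enumerate_nil]
  | cons x xs ih =>
    intro s
    rw [PySem.List.enumerate_cons, List.filter_cons]
    by_cases hx : x = SKIP_HEADER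
    · subst hx
      have hle := List.length_filter_le (fun p : Int × String => p.2 != SKIP_HEADER)
        (PySem.List.enumerate xs (s + 1))
      rw [PySem.List.length_enumerate] at hle
      simp only [bne_self_eq_false, Bool.false_eq_true, if_false, List.length_cons,
        List.mem_cons, true_or, not_true_eq_false, iff_false]
      omega
    · simp only [ne_eq, hx, not_false_eq_true, bne_iff_ne, if_pos, List.length_cons,
        Nat.add_right_cancel_iff, ih (s + 1), List.mem_cons, not_or]
      exact ⟨fun h => ⟨fun he => hx he.symm, h⟩, And.right⟩

theorem filterMap_if (l : List (Int × String)) (g : Int → List String) :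
    l.filterMap (fun p => if p.2 != SKIP_HEADER then some (g p.1) else none)
      = (((l.filter (fun p => p.2 != SKIP_HEADER)).map (fun p => p.1)).map g) := by
  induction l with
  | nil => rfl
  | cons p l ih =>
    rw [List.filterMap_cons, List.filter_cons]
    by_cases h : (p.2 != SKIP_HEADER) = true
    · rw [if_pos h, if_pos h, List.map_cons, List.map_cons, ih]
    · rw [if_neg h, if_neg h]; exact ih

theorem zipStar_cols (f : Int → List String → String) (k : Int) (ks : List Int) :
    ∀ rows : List (List String),
    pyZipStar (rows.map (fun row => f k row)) (ks.map (fun i => rows.map (fun row => f i row)))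
      = rows.map (fun row => (k :: ks).map (fun i => f i row)) := by
  intro rows
  induction rows with
  | nil => simp [pyZipStar]
  | cons r rs ih =>
    simp only [List.map_cons, pyZipStar, List.map_map]
    have hcond : ((ks.map (fun i => f i r :: rs.map (fun row => f i row))).all
        (fun l => !l.isEmpty)) = true := by
      simp [List.all_eq_true]
    rw [hcond]
    simp only [if_pos, Function.comp_def, List.headD_cons, List.tail_cons, ih, List.map_cons]

theorem drop_skipped_columns_spec : Claim_equal_drop_skipped_columns := by
  intro rows _
  unfold Spec_drop_skipped_columns
  rcases rows with _ | ⟨header, rest⟩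
  · rfl
  · simp only [drop_skipped_columns, drop_skipped_columns_alt]
    by_cases hmem : SKIP_HEADER ∈ header
    · have hc : header.contains SKIP_HEADER = true := by simpa using hmem
      have hlen : ¬ ((((PySem.List.enumerate header 0).filter
          (fun p => p.2 != SKIP_HEADER)).map (fun p => p.1)).length = header.length) := by
        rw [List.length_map]
        exact fun h => (keepLen header 0).mp h hmem
      rw [if_neg hlen, hc]
      simp only [Bool.not_true, Bool.false_eq_true, if_false]
      rw [filterMap_if (PySem.List.enumerate header 0)
        (fun i => (header :: rest).map (fun row =>
          if i < (row.length : Int) then PySem.List.pyGetD row i "" else ""))]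
      generalize ((PySem.List.enumerate header 0).filter
          (fun p => p.2 != SKIP_HEADER)).map (fun p => p.1) = keep
      cases keep with
      | nil => simp
      | cons k ks =>
        rw [List.map_cons]
        exact (zipStar_cols
          (fun i row => if i < (row.length : Int) then PySem.List.pyGetD row i "" else "")
          k ks (header :: rest)).symm
    · have hc : header.contains SKIP_HEADER = false := by simpa using hmem
      have hlen : ((((PySem.List.enumerate header 0).filter
          (fun p => p.2 != SKIP_HEADER)).map (fun p => p.1)).length = header.length) := by
        rw [List.length_map]; exact (keepLen header 0).mpr hmem
      rw [if_pos hlen, hc]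
      rfl
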